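-- pv_equiv track=rewrite | github.com/asdfljyy/graduate-design | Implementation of uBlock-128/uBlock_128.py | xor_32
-- ===== SOURCE A (Python) =====
-- def i2b(i):#int类型转换为32比特二进制字符串
--     return bin(i)[2:].zfill(32)
--
-- def xor_32(s1,s2):#32比特十六进制字符串异或
--     s1=i2b(int(s1,16))
--     s2=i2b(int(s2,16))
--     s=''
--     size=len(s1)
--     for i in range(size):
--         if s1[i]==s2[i]:
--             s=s+'0'
--         else:
--             s=s+'1'
--     s=hex(int(s,2))
--     if len(s)<(2+size//4):
--         s='0x'+'0'*(10-len(s))+s[2:]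
--     return s[2:]
-- ===== SOURCE B (Python) =====
-- def xor_32(s1, s2):  # 32-bit hex XOR: one integer XOR, zero-padded width-8 lowercase hex
--     return format(int(s1, 16) ^ int(s2, 16), '08x')
-- ===== Notes on version B (the rewrite author's own statement) =====
-- stated objective: simpler
-- what changed: A converts both operands to zero-filled binary strings, compares them character by character in a Python loop, reparses the built bit string and re-pads the hex output by hand; B computes the same result as format(int(s1,16)^int(s2,16),'08x'), one integer XOR plus zero-padded width-8 lowercase hex formatting.
-- outside the precondition, e.g. on xor_32('-5', '3'): A returns '0000000e', B returns '-0000008'; on xor_32('0', '100000000'): A returns '80000000', B returns '100000000'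
import Mathlib
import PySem

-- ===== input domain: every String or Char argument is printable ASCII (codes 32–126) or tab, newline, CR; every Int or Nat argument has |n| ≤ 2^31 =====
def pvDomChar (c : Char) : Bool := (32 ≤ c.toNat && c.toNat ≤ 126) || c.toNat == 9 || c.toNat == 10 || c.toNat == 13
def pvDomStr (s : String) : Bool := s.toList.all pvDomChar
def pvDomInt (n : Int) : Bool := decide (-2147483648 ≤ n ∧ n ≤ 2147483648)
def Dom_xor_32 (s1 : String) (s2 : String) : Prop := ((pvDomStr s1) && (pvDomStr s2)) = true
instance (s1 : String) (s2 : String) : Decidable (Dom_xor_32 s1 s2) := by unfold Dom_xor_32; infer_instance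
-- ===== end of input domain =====

-- B replaces A's bit-by-bit comparison of two 32-character binary strings by a single
-- integer XOR formatted as zero-padded width-8 lowercase hex (objective: simpler).

-- ===== PORT A =====
-- bin(i)[2:] : binary digits, most significant first (exact for the i ≥ 0 that Pre_ admits)
def pvBinDigitsAux (n : Nat) : List Char :=
  if h : n = 0 then []
  else pvBinDigitsAux (n / 2) ++ [if n % 2 = 1 then '1' else '0']
decreasing_by exact Nat.div_lt_self (Nat.pos_of_ne_zero h) one_lt_two

def pvBinStr (n : Nat) : List Char := if n = 0 then ['0'] else pvBinDigitsAux n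

-- i2b(i) = bin(i)[2:].zfill(32)
def pvI2b (n : Nat) : List Char := PySem.Chars.zfill (pvBinStr n) 32

-- hex digits of n, lowercase, most significant first (exact for n ≥ 0)
def pvHexDigitsAux (n : Nat) : List Char :=
  if h : n = 0 then []
  else pvHexDigitsAux (n / 16) ++ [Nat.digitChar (n % 16)]
decreasing_by exact Nat.div_lt_self (Nat.pos_of_ne_zero h) (by norm_num)

-- hex(n) for n ≥ 0
def pvHexStr (n : Nat) : List Char := ['0', 'x'] ++ (if n = 0 then ['0'] else pvHexDigitsAux n)

-- int(s, 2), hand-ported: exact for unsigned strings of '0'/'1' digits without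
-- whitespace/sign/underscores — which is every string A's comparison loop can produce
def pvIntOfBin? (cs : List Char) : Option Nat :=
  if cs = [] ∨ ¬ (cs.all fun c => c == '0' || c == '1') then none
  else some (cs.foldl (fun a c => 2 * a + (if c = '1' then 1 else 0)) 0)

def xor_32 (s1 : String) (s2 : String) : String :=
  match PySem.Int.ofStrBase? s1 16, PySem.Int.ofStrBase? s2 16 with
  | some v1, some v2 =>
    let b1 := pvI2b v1.toNat   -- .toNat: exact for v1 ≥ 0 (Pre_); bin() of a negative differs
    let b2 := pvI2b v2.toNat
    let size := b1.length
    let s : List Char := (PySem.List.pyRange 0 (size : Int) 1).foldl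
      (fun acc i =>
        if PySem.List.pyGetD b1 i ' ' = PySem.List.pyGetD b2 i ' '
        then acc ++ ['0'] else acc ++ ['1']) []
    -- (pyGetD's default is only reached where Python raises IndexError — outside Pre_)
    match pvIntOfBin? s with
    | some v =>
      let h0 := pvHexStr v
      let h1 := if h0.length < 2 + size / 4
                then ['0', 'x'] ++ (List.replicate (10 - h0.length) '0' ++ h0.drop 2)
                else h0
      String.ofList (h1.drop 2)
    | none => ""   -- unreachable: the loop emits only '0'/'1'
  | _, _ => ""     -- int(sᵢ, 16) raises ValueError: excluded by Pre_

-- ===== PORT B =====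
def xor_32_alt (s1 : String) (s2 : String) : String :=
  match PySem.Int.ofStrBase? s1 16 with
  | none => ""
  | some v1 =>
    match PySem.Int.ofStrBase? s2 16 with
    | none => ""
    | some v2 =>
      let x := v1.toNat ^^^ v2.toNat
      -- format(x, '08x'): lowercase hex digits left-padded with '0' to width 8
      let d := if x = 0 then ['0'] else pvHexDigitsAux x
      String.ofList (List.replicate (8 - d.length) '0' ++ d)

-- ===== PRECONDITION & SPEC =====
-- Pre_ restricts to the domain where A performs an aligned XOR: both operands parse as
-- hex (else int(s,16) raises ValueError), are nonnegative (bin() of a negative leaks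
-- '-'/'b' characters into the comparison loop), and their zero-filled binary strings
-- have equal length, i.e. max(32, bit_length) agrees (otherwise A raises IndexError or
-- compares the two bit strings misaligned).
def Pre_xor_32 (s1 : String) (s2 : String) : Prop :=
  (PySem.Int.ofStrBase? s1 16).isSome = true ∧
  0 ≤ (PySem.Int.ofStrBase? s1 16).getD 0 ∧
  (PySem.Int.ofStrBase? s2 16).isSome = true ∧
  0 ≤ (PySem.Int.ofStrBase? s2 16).getD 0 ∧
  max 32 (PySem.Int.bitLength ((PySem.Int.ofStrBase? s1 16).getD 0))
    = max 32 (PySem.Int.bitLength ((PySem.Int.ofStrBase? s2 16).getD 0))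
instance (s1 : String) (s2 : String) : Decidable (Pre_xor_32 s1 s2) := by
  unfold Pre_xor_32; infer_instance

def pvWitness_xor_32 : String × String := ("a3", "5")

def Spec_xor_32 (s1 : String) (s2 : String) (out : String) : Prop := out = xor_32_alt s1 s2
instance (s1 : String) (s2 : String) (out : String) : Decidable (Spec_xor_32 s1 s2 out) := by
  unfold Spec_xor_32; infer_instance

-- ===== CLAIM (what is proved, stated in full; the proofs are below) =====
def Claim_equal_xor_32 : Prop := ∀ (s1 : String) (s2 : String), Dom_xor_32 s1 s2 → Pre_xor_32 s1 s2 → Spec_xor_32 s1 s2 (xor_32 s1 s2)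

-- ===== LEMMAS AND PROOFS =====

-- proof-side normal form: the k low bits of m, most significant first
def pvBits : Nat → Nat → List Char
  | 0, _ => []
  | k + 1, m => pvBits k (m / 2) ++ [if m % 2 = 1 then '1' else '0']

theorem pvBits_length (k m : Nat) : (pvBits k m).length = k := by
  induction k generalizing m with
  | zero => rfl
  | succ k ih => simp [pvBits, ih]

theorem pvBits_zero (k : Nat) : pvBits k 0 = List.replicate k '0' := by
  induction k with
  | zero => rfl
  | succ k ih => simp [pvBits, ih, List.replicate_succ']

theorem pvBits_mem {k m : Nat} {c : Char} (h : c ∈ pvBits k m) : c = '0' ∨ c = '1' := by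
  induction k generalizing m with
  | zero => simp [pvBits] at h
  | succ k ih =>
    simp only [pvBits, List.mem_append, List.mem_singleton] at h
    rcases h with h | h
    · exact ih h
    · split at h <;> simp [h]

theorem pvBits_pad {k m : Nat} (h : m < 2 ^ k) (hm : 0 < m) :
    List.replicate (k - (pvBinDigitsAux m).length) '0' ++ pvBinDigitsAux m = pvBits k m := by
  induction k generalizing m with
  | zero => omega
  | succ k ih =>
    rw [pvBinDigitsAux, dif_neg (by omega : ¬ m = 0)]
    by_cases h2 : m / 2 = 0
    · have hm1 : m = 1 := by omega
      subst hm1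
      simp [pvBits, pvBinDigitsAux, pvBits_zero, List.replicate_succ']
    · have hlt : m / 2 < 2 ^ k := by rw [pow_succ] at h; omega
      have := ih hlt (Nat.pos_of_ne_zero h2)
      rw [pvBits, ← this]
      simp [List.length_append, Nat.succ_sub_succ, List.append_assoc]

theorem pvBinDigitsAux_mem {m : Nat} {c : Char} (h : c ∈ pvBinDigitsAux m) :
    c = '0' ∨ c = '1' := by
  by_cases hm : m = 0
  · simp [pvBinDigitsAux, hm] at h
  · rw [pvBinDigitsAux, dif_neg hm] at h
    simp only [List.mem_append, List.mem_singleton] at h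
    rcases h with h | h
    · exact pvBinDigitsAux_mem h
    · split at h <;> simp [h]
decreasing_by exact Nat.div_lt_self (Nat.pos_of_ne_zero hm) one_lt_two

theorem pvBinDigitsAux_bitLength {m : Nat} (hm : m ≠ 0) :
    (pvBinDigitsAux m).length = PySem.Int.bitLength (m : Int) := by
  induction m using Nat.strong_induction_on with
  | _ m ih =>
    rw [pvBinDigitsAux, dif_neg hm]
    by_cases h2 : m / 2 = 0
    · have h1 : m = 1 := by omega
      subst h1
      simp [pvBinDigitsAux]
      decide
    · rw [List.length_append, ih (m / 2) (Nat.div_lt_self (Nat.pos_of_ne_zero hm) one_lt_two) h2,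
        PySem.Int.bitLength_natCast (Nat.pos_of_ne_zero hm)]
      simp

theorem pvBinDigitsAux_lt {m : Nat} (hm : m ≠ 0) : m < 2 ^ (pvBinDigitsAux m).length := by
  rw [pvBinDigitsAux_bitLength hm]
  have := PySem.Int.lt_two_pow_bitLength (m : Int)
  simpa using this

theorem pvI2b_eq (m : Nat) :
    pvI2b m = pvBits (max 32 (PySem.Int.bitLength (m : Int))) m := by
  rw [pvI2b, pvBinStr]
  by_cases hm : m = 0
  · subst hm
    rw [if_pos rfl]
    have h0 : max 32 (PySem.Int.bitLength ((0:Nat) : Int)) = 32 := by decide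
    rw [h0, pvBits_zero]
    decide
  · rw [if_neg hm]
    have hbl := pvBinDigitsAux_bitLength hm
    have hlt := pvBinDigitsAux_lt hm
    rw [PySem.Chars.zfill.eq_def]
    obtain ⟨c, rest, hc⟩ := List.exists_cons_of_ne_nil
      (by rw [pvBinDigitsAux, dif_neg hm]; simp : pvBinDigitsAux m ≠ [])
    have hcm : c = '0' ∨ c = '1' := pvBinDigitsAux_mem (by rw [hc]; simp)
    by_cases hfull : (32:Int) ≤ (pvBinDigitsAux m).length
    · rw [if_pos hfull]
      have hmax : max 32 (PySem.Int.bitLength (m : Int)) = (pvBinDigitsAux m).length := by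
        omega
      rw [hmax, ← pvBits_pad hlt (Nat.pos_of_ne_zero hm)]
      simp
    · rw [if_neg hfull, hc]
      have hns : ¬ (c = '+' ∨ c = '-') := by rcases hcm with h' | h' <;> simp [h']
      have hmax : max 32 (PySem.Int.bitLength (m : Int)) = 32 := by omega
      have hlt32 : m < 2 ^ 32 :=
        lt_of_lt_of_le hlt (Nat.pow_le_pow_right (by norm_num) (by omega))
      rw [hmax]
      simp only [hns, if_false, ← hc, ← pvBits_pad hlt32 (Nat.pos_of_ne_zero hm)]
      congr 1

theorem pvBits_zipWith (k m1 m2 : Nat) :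
    List.zipWith (fun a b => if a = b then '0' else '1') (pvBits k m1) (pvBits k m2)
      = pvBits k (m1 ^^^ m2) := by
  induction k generalizing m1 m2 with
  | zero => rfl
  | succ k ih =>
    have hlen : (pvBits k (m1 / 2)).length = (pvBits k (m2 / 2)).length := by
      simp [pvBits_length]
    simp only [pvBits, List.zipWith_append hlen, List.zipWith_cons_cons,
      List.zipWith_nil_right]
    rw [ih, Nat.xor_div_two]
    congr 1
    have h2 : (m1 ^^^ m2) % 2 = (m1 % 2) ^^^ (m2 % 2) := by
      simpa using Nat.xor_mod_two_pow (n := 1) (a := m1) (b := m2)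
    have ha := Nat.mod_two_eq_zero_or_one m1
    have hb := Nat.mod_two_eq_zero_or_one m2
    rcases ha with ha | ha <;> rcases hb with hb | hb <;> all_goals simp [h2, ha, hb]

theorem map_range_getD_zip {α β : Type} (f : α → α → β) (d : α) (n : Nat)
    (xs ys : List α) (hx : xs.length = n) (hy : ys.length = n) :
    (List.range n).map (fun i => f (xs.getD i d) (ys.getD i d)) = List.zipWith f xs ys := by
  apply List.ext_getElem
  · simp [hx, hy]
  · intro i h1 h2
    simp only [List.getElem_map, List.getElem_range, List.getElem_zipWith]
    rw [List.getD_eq_getElem, List.getD_eq_getElem] <;> simp_all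

theorem pvBits_foldl (k m a : Nat) :
    (pvBits k m).foldl (fun a c => 2 * a + (if c = '1' then 1 else 0)) a
      = a * 2 ^ k + m % 2 ^ k := by
  induction k generalizing m a with
  | zero => simp [pvBits, Nat.mod_one]
  | succ k ih =>
    rw [pvBits, List.foldl_append, ih]
    have hm : m % (2 ^ k * 2) = m % 2 + 2 * (m / 2 % 2 ^ k) := by
      rw [Nat.mul_comm (2^k) 2, Nat.mod_mul]; try ring
    have hr := Nat.mod_two_eq_zero_or_one m
    rcases hr with hr | hr <;>
      · simp [List.foldl, hr, pow_succ, hm]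
        try ring

theorem pvIntOfBin_pvBits {k m : Nat} (hk : 1 ≤ k) (h : m < 2 ^ k) :
    pvIntOfBin? (pvBits k m) = some m := by
  rw [pvIntOfBin?, if_neg, pvBits_foldl]
  · rw [Nat.mod_eq_of_lt h]; simp
  · rintro (hnil | hall)
    · have := pvBits_length k m
      rw [hnil] at this
      simp at this
      omega
    · apply hall
      rw [List.all_eq_true]
      intro c hc
      rcases pvBits_mem hc with h' | h' <;> simp [h']

-- ===== VERDICT (by name: the statement is the Claim_ definition above) =====
theorem xor_32_spec : Claim_equal_xor_32 := by
  intro s1 s2 _ hpre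
  obtain ⟨h1s, h1lo, h2s, h2lo, hL⟩ := hpre
  obtain ⟨v1, hv1⟩ := Option.isSome_iff_exists.mp h1s
  obtain ⟨v2, hv2⟩ := Option.isSome_iff_exists.mp h2s
  rw [hv1] at h1lo hL
  rw [hv2] at h2lo hL
  simp only [Option.getD_some] at h1lo h2lo hL
  have ht1 : ((v1.toNat : Nat) : Int) = v1 := Int.toNat_of_nonneg h1lo
  have ht2 : ((v2.toNat : Nat) : Int) = v2 := Int.toNat_of_nonneg h2lo
  have hm1 : v1.toNat < 2 ^ max 32 (PySem.Int.bitLength v1) := by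
    rcases Nat.eq_zero_or_pos v1.toNat with h0 | h0
    · rw [h0]; positivity
    · calc v1.toNat < 2 ^ (pvBinDigitsAux v1.toNat).length := pvBinDigitsAux_lt (by omega)
        _ ≤ 2 ^ max 32 (PySem.Int.bitLength v1) := by
            rw [pvBinDigitsAux_bitLength (by omega : v1.toNat ≠ 0), ht1]
            exact Nat.pow_le_pow_right (by norm_num) (le_max_right _ _)
  have hm2 : v2.toNat < 2 ^ max 32 (PySem.Int.bitLength v1) := by
    rw [hL]
    rcases Nat.eq_zero_or_pos v2.toNat with h0 | h0
    · rw [h0]; positivity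
    · calc v2.toNat < 2 ^ (pvBinDigitsAux v2.toNat).length := pvBinDigitsAux_lt (by omega)
        _ ≤ 2 ^ max 32 (PySem.Int.bitLength v2) := by
            rw [pvBinDigitsAux_bitLength (by omega : v2.toNat ≠ 0), ht2]
            exact Nat.pow_le_pow_right (by norm_num) (le_max_right _ _)
  set L : Nat := max 32 (PySem.Int.bitLength v1) with hLdef
  have hx : v1.toNat ^^^ v2.toNat < 2 ^ L := Nat.xor_lt_two_pow hm1 hm2
  have hL32 : 32 ≤ L := le_max_left _ _
  show xor_32 s1 s2 = xor_32_alt s1 s2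
  rw [xor_32, xor_32_alt, hv1, hv2]
  have hi1 : pvI2b v1.toNat = pvBits L v1.toNat := by rw [pvI2b_eq, ht1]
  have hi2 : pvI2b v2.toNat = pvBits L v2.toNat := by rw [pvI2b_eq, ht2, ← hL]
  simp only [hi1, hi2, pvBits_length, PySem.List.pyRange_one]
  have hb : (fun (acc : List Char) (k : Nat) =>
        if PySem.List.pyGetD (pvBits L v1.toNat) (0 + (k:Int)) ' '
            = PySem.List.pyGetD (pvBits L v2.toNat) (0 + (k:Int)) ' '
        then acc ++ ['0'] else acc ++ ['1'])
      = fun acc k => acc ++ [if (pvBits L v1.toNat).getD k ' '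
            = (pvBits L v2.toNat).getD k ' ' then '0' else '1'] := by
    funext acc k
    simp only [zero_add, PySem.List.pyGetD_natCast]
    split <;> rfl
  rw [List.foldl_map, hb, PySem.List.foldl_append_singleton_eq_map, List.nil_append]
  have hLL : (((L:Nat):Int) - 0).toNat = L := by omega
  rw [hLL, map_range_getD_zip (fun a b => if a = b then '0' else '1') ' ' L
      (pvBits L v1.toNat) (pvBits L v2.toNat) (pvBits_length _ _) (pvBits_length _ _),
    pvBits_zipWith, pvIntOfBin_pvBits (by omega) hx]
  set x := v1.toNat ^^^ v2.toNat with hxdef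
  set d : List Char := (if x = 0 then ['0'] else pvHexDigitsAux x) with hd
  have hps : pvHexStr x = ['0', 'x'] ++ d := by rw [pvHexStr, hd]
  show String.ofList (List.drop 2 (if (pvHexStr x).length < 2 + L / 4 then
      ['0', 'x'] ++ (List.replicate (10 - (pvHexStr x).length) '0' ++ List.drop 2 (pvHexStr x))
    else pvHexStr x)) = String.ofList (List.replicate (8 - d.length) '0' ++ d)
  rw [hps]
  have hlen : (['0', 'x'] ++ d).length = 2 + d.length := by simp; omega
  have hL4 : 8 ≤ L / 4 := by omega
  by_cases hc : d.length < L / 4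
  · rw [if_pos (by rw [hlen]; omega)]
    show String.ofList (List.replicate (10 - (['0', 'x'] ++ d).length) '0' ++ List.drop 2 (['0', 'x'] ++ d))
      = String.ofList (List.replicate (8 - d.length) '0' ++ d)
    have hdrop : List.drop 2 (['0', 'x'] ++ d) = d := rfl
    rw [hlen, hdrop, (by omega : 10 - (2 + d.length) = 8 - d.length)]
  · rw [if_neg (by rw [hlen]; omega)]
    have h8 : 8 ≤ d.length := by omega
    show String.ofList d = String.ofList (List.replicate (8 - d.length) '0' ++ d)
    rw [(by omega : 8 - d.length = 0)]
    simp
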